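-- pv_equiv track=rewrite | github.com/aeioon/Alg2_juagarciama | parcial1/pass.py | increase_guess_by_1
-- ===== SOURCE A (Python) =====
-- def increase_guess_by_1(guess):
--     # if is letter a then b then c ... z then a
--     # if is digit 0 then 1 then 2 ... 9 then 0
--     # e.g. '00bd34z' -> '00bd35a'
--
--     carry = 1
--     for index, pat in enumerate(reversed(guess)):
--         if carry == 1:
--             if pat == '9':
--                 guess = guess[:len(guess) - index - 1] + '0' + guess[len(guess) - index:]
--             elif pat == 'z':
--                 guess = guess[:len(guess) - index - 1] + 'a' + guess[len(guess) - index:]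
--             else:
--                 # if i is a digit then add 1
--                 # if i is a letter then add 1 to the next letter
--                 guess = guess[:len(guess) - index - 1] + chr(ord(pat) + 1) + guess[len(guess) - index:]
--                 carry = 0
--         else:
--             break
--     return guess
-- ===== SOURCE B (Python) =====
-- def increase_guess_by_1(guess):
--     # Two phases: locate the rightmost non-wrapping character, then build once.
--     i = len(guess) - 1
--     while i >= 0 and (guess[i] == '9' or guess[i] == 'z'):
--         i -= 1
--     reset = ''.join('0' if c == '9' else 'a' for c in guess[i + 1:])
--     if i < 0:
--         return reset
--     return guess[:i] + chr(ord(guess[i]) + 1) + reset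
-- ===== Notes on version B (the rewrite author's own statement) =====
-- stated objective: simpler
-- what changed: Replaced A's fused carry-propagation loop that rebuilds the whole string by slicing at every step with a two-phase construction: locate the rightmost non-wrapping character, then build the answer once from a prefix, one incremented character and a mapped reset suffix.
import Mathlib
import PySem

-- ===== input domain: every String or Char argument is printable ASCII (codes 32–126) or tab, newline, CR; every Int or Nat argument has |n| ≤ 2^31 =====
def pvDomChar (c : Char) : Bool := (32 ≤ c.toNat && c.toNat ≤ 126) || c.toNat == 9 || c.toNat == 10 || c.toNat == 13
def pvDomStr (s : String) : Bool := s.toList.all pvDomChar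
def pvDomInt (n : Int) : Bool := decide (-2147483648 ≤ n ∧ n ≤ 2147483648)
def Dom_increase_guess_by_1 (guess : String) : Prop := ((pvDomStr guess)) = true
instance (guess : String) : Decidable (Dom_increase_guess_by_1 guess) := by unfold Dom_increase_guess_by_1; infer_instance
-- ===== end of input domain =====

-- B builds the answer once (boundary scan + mapped reset suffix) instead of A's
-- carry loop that re-slices and rebuilds the string at every wrapping step: simpler.


-- ===== PORT A =====
-- one iteration of A's `for index, pat in enumerate(reversed(guess))` loop;
-- state = (guess as char list, carry, broken); `break` is the broken flag
def pvStepA (st : List Char × Int × Bool) (ip : Int × Char) : List Char × Int × Bool :=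
  let g := st.1
  if st.2.2 then st
  else if st.2.1 = 1 then
    let index := ip.1
    let pat := ip.2
    let pre := PySem.List.slice g none (some ((g.length : Int) - index - 1))
    let suf := PySem.List.slice g (some ((g.length : Int) - index)) none
    if pat = '9' then (pre ++ '0' :: suf, st.2.1, st.2.2)
    else if pat = 'z' then (pre ++ 'a' :: suf, st.2.1, st.2.2)
    else (pre ++ Char.ofNat (pat.toNat + 1) :: suf, 0, st.2.2)
  else (g, st.2.1, true)

def increase_guess_by_1 (guess : String) : String :=
  -- reversed(guess) is the reversal of the ORIGINAL string (the iterator is fixed)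
  let res := (PySem.List.enumerate guess.toList.reverse 0).foldl pvStepA (guess.toList, 1, false)
  String.ofList res.1

-- ===== PORT B =====
-- B's `while i >= 0 and (guess[i] == '9' or guess[i] == 'z'): i -= 1`
def pvFindB (g : List Char) (i : Int) : Int :=
  if h : 0 ≤ i ∧ (PySem.List.pyGetD g i ' ' = '9' ∨ PySem.List.pyGetD g i ' ' = 'z') then
    pvFindB g (i - 1)
  else i
termination_by (i + 1).toNat
decreasing_by omega

def increase_guess_by_1_alt (guess : String) : String :=
  let cs := guess.toList
  let i := pvFindB cs ((cs.length : Int) - 1)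
  let reset := (PySem.List.slice cs (some (i + 1)) none).map (fun c => if c = '9' then '0' else 'a')
  if i < 0 then String.ofList reset
  else String.ofList (PySem.List.slice cs none (some i) ++
                   Char.ofNat ((PySem.List.pyGetD cs i ' ').toNat + 1) :: reset)

-- ===== PRECONDITION & SPEC =====
def Spec_increase_guess_by_1 (guess : String) (out : String) : Prop := out = increase_guess_by_1_alt guess
instance (guess : String) (out : String) : Decidable (Spec_increase_guess_by_1 guess out) := by unfold Spec_increase_guess_by_1; infer_instance

-- ===== CLAIM (what is proved, stated in full; the proofs are below) =====
def Claim_equal_increase_guess_by_1 : Prop := ∀ (guess : String), Dom_increase_guess_by_1 guess → Spec_increase_guess_by_1 guess (increase_guess_by_1 guess)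

-- ===== LEMMAS AND PROOFS =====

-- common spec: increment the reversed char list
def pvIncR : List Char → List Char
  | [] => []
  | c :: rest =>
    if c = '9' then '0' :: pvIncR rest
    else if c = 'z' then 'a' :: pvIncR rest
    else Char.ofNat (c.toNat + 1) :: rest

theorem pvFoldA_dead (l : List (Int × Char)) (g : List Char) :
    l.foldl pvStepA (g, 0, true) = (g, 0, true) := by
  induction l with
  | nil => rfl
  | cons p l ih => simpa [pvStepA] using ih

theorem pvFoldA_carry0 (l : List (Int × Char)) (g : List Char) (b : Bool) :
    (l.foldl pvStepA (g, 0, b)).1 = g := by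
  cases l with
  | nil => rfl
  | cons p l =>
    cases b <;> simp [List.foldl_cons, pvStepA, pvFoldA_dead]

theorem pvFoldA_main : ∀ (r2 : List Char) (k : Nat) (tail : List Char), tail.length = k →
    ((PySem.List.enumerate r2 (k : Int)).foldl pvStepA (r2.reverse ++ tail, 1, false)).1
      = (pvIncR r2).reverse ++ tail := by
  intro r2
  induction r2 with
  | nil => intro k tail _; simp [PySem.List.enumerate, pvIncR]
  | cons c rest ih =>
    intro k tail hk
    have hrev : (c :: rest).reverse ++ tail = rest.reverse ++ c :: tail := by simp
    have hpre : PySem.List.slice (rest.reverse ++ c :: tail) none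
        (some ((rest.length : Int) + ((tail.length : Int) + 1) - (k : Int) - 1)) = rest.reverse := by
      rw [PySem.List.slice_to _ (by omega)]
      have ht : ((rest.length : Int) + ((tail.length : Int) + 1) - (k : Int) - 1).toNat = rest.length := by omega
      rw [ht, List.take_left' (by simp)]
    have hsuf : PySem.List.slice (rest.reverse ++ c :: tail)
        (some ((rest.length : Int) + ((tail.length : Int) + 1) - (k : Int))) none = tail := by
      rw [PySem.List.slice_from _ (by omega)]
      have ht : ((rest.length : Int) + ((tail.length : Int) + 1) - (k : Int)).toNat = rest.length + 1 := by omega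
      rw [ht, show rest.reverse ++ c :: tail = (rest.reverse ++ [c]) ++ tail by simp]
      rw [List.drop_append_of_le_length (by simp)]
      simp
    have hcast : (k : Int) + 1 = ((k + 1 : Nat) : Int) := by push_cast; ring
    rw [PySem.List.enumerate_cons, List.foldl_cons, hrev]
    by_cases h9 : c = '9'
    · subst h9
      have hstep : pvStepA (rest.reverse ++ '9' :: tail, 1, false) ((k : Int), '9')
          = (rest.reverse ++ '0' :: tail, 1, false) := by
        simp only [pvStepA]
        norm_num
        rw [hpre, hsuf]
      rw [hstep, hcast,
        show rest.reverse ++ '0' :: tail = rest.reverse ++ ('0' :: tail) from rfl,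
        ih (k + 1) ('0' :: tail) (by simp [hk])]
      simp [pvIncR]
    · by_cases hz : c = 'z'
      · subst hz
        have hstep : pvStepA (rest.reverse ++ 'z' :: tail, 1, false) ((k : Int), 'z')
            = (rest.reverse ++ 'a' :: tail, 1, false) := by
          simp only [pvStepA]
          norm_num
          rw [if_neg h9, hpre, hsuf]
        rw [hstep, hcast,
          show rest.reverse ++ 'a' :: tail = rest.reverse ++ ('a' :: tail) from rfl,
          ih (k + 1) ('a' :: tail) (by simp [hk])]
        simp [pvIncR]
      · have hstep : pvStepA (rest.reverse ++ c :: tail, 1, false) ((k : Int), c)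
            = (rest.reverse ++ Char.ofNat (c.toNat + 1) :: tail, 0, false) := by
          simp only [pvStepA]
          norm_num [h9, hz]
          rw [hpre, hsuf]
        rw [hstep, pvFoldA_carry0]
        simp [pvIncR, h9, hz]

-- A's result, at the char-list level
theorem pvA_char (cs : List Char) :
    ((PySem.List.enumerate cs.reverse 0).foldl pvStepA (cs, 1, false)).1
      = (pvIncR cs.reverse).reverse := by
  have := pvFoldA_main cs.reverse 0 [] rfl
  simpa using this

-- pvFindB stays within [-1, i], and only probes indices ≤ its argument
theorem pvFindB_bounds : ∀ (m : Nat) (g : List Char) (i : Int), (i + 1).toNat ≤ m →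
    pvFindB g i ≤ i ∧ -1 ≤ pvFindB g i ∨ pvFindB g i = i := by
  intro m
  induction m with
  | zero =>
    intro g i hm
    rw [pvFindB]
    have : ¬ (0 ≤ i ∧ (PySem.List.pyGetD g i ' ' = '9' ∨ PySem.List.pyGetD g i ' ' = 'z')) := by
      intro ⟨h0, _⟩; omega
    simp [this]
  | succ m ih =>
    intro g i hm
    rw [pvFindB]
    split
    · rename_i h
      rcases ih g (i - 1) (by omega) with h' | h' <;> [left; left]
      · exact ⟨by omega, h'.2⟩
      · exact ⟨by omega, by omega⟩
    · right; rfl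

theorem pvFindB_le (g : List Char) (i : Int) : -1 ≤ i → -1 ≤ pvFindB g i ∧ pvFindB g i ≤ i := by
  intro h
  rcases pvFindB_bounds (i + 1).toNat g i le_rfl with h' | h'
  · exact ⟨h'.2, h'.1⟩
  · rw [h']; omega

theorem pvFindB_append : ∀ (m : Nat) (rest : List Char) (c : Char) (i : Int),
    (i + 1).toNat ≤ m → i < (rest.length : Int) →
    pvFindB (rest ++ [c]) i = pvFindB rest i := by
  intro m
  induction m with
  | zero =>
    intro rest c i hm hi
    have h0 : ¬ ((0 : Int) ≤ i) := by omega
    have h1 : ¬ ((0 : Int) ≤ i ∧ (PySem.List.pyGetD (rest ++ [c]) i ' ' = '9' ∨ PySem.List.pyGetD (rest ++ [c]) i ' ' = 'z')) := fun h => h0 h.1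
    have h2 : ¬ ((0 : Int) ≤ i ∧ (PySem.List.pyGetD rest i ' ' = '9' ∨ PySem.List.pyGetD rest i ' ' = 'z')) := fun h => h0 h.1
    conv_lhs => rw [pvFindB]
    conv_rhs => rw [pvFindB]
    rw [dif_neg h1, dif_neg h2]
  | succ m ih =>
    intro rest c i hm hi
    by_cases h0 : 0 ≤ i
    · have hget : PySem.List.pyGetD (rest ++ [c]) i ' ' = PySem.List.pyGetD rest i ' ' := by
        rw [PySem.List.pyGetD_eq_getElem _ _ h0 (by simp; omega),
            PySem.List.pyGetD_eq_getElem _ _ h0 (by omega)]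
        rw [List.getElem_append_left (by omega)]
      conv_lhs => rw [pvFindB]
      conv_rhs => rw [pvFindB]
      rw [hget]
      by_cases hC : (0 : Int) ≤ i ∧ (PySem.List.pyGetD rest i ' ' = '9' ∨ PySem.List.pyGetD rest i ' ' = 'z')
      · rw [dif_pos hC, dif_pos hC]
        exact ih rest c (i - 1) (by omega) (by omega)
      · rw [dif_neg hC, dif_neg hC]
    · have h1 : ¬ ((0 : Int) ≤ i ∧ (PySem.List.pyGetD (rest ++ [c]) i ' ' = '9' ∨ PySem.List.pyGetD (rest ++ [c]) i ' ' = 'z')) := fun h => h0 h.1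
      have h2 : ¬ ((0 : Int) ≤ i ∧ (PySem.List.pyGetD rest i ' ' = '9' ∨ PySem.List.pyGetD rest i ' ' = 'z')) := fun h => h0 h.1
      conv_lhs => rw [pvFindB]
      conv_rhs => rw [pvFindB]
      rw [dif_neg h1, dif_neg h2]

-- B's result, at the char-list level
def pvBaux (cs : List Char) (i : Int) : List Char :=
  if i < 0 then (PySem.List.slice cs (some (i + 1)) none).map (fun c => if c = '9' then '0' else 'a')
  else PySem.List.slice cs none (some i) ++
        Char.ofNat ((PySem.List.pyGetD cs i ' ').toNat + 1) ::
          (PySem.List.slice cs (some (i + 1)) none).map (fun c => if c = '9' then '0' else 'a')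

def pvBList (cs : List Char) : List Char :=
  pvBaux cs (pvFindB cs ((cs.length : Int) - 1))

theorem pvB_eq_list (guess : String) : increase_guess_by_1_alt guess = String.ofList (pvBList guess.toList) := by
  unfold increase_guess_by_1_alt pvBList pvBaux
  exact (apply_ite String.ofList _ _ _).symm

theorem pvB_char : ∀ (r : List Char), pvBList r.reverse = (pvIncR r).reverse := by
  intro r
  induction r with
  | nil =>
    have h : pvFindB ([] : List Char) (-1) = -1 := by
      rw [pvFindB]
      exact dif_neg (by norm_num)
    norm_num [pvBList, pvBaux, h, PySem.List.slice, pvIncR]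
  | cons c rest ih =>
    have hcons : (c :: rest).reverse = rest.reverse ++ [c] := by simp
    have hlen : (((rest.reverse ++ [c]).length : Int)) - 1 = (rest.length : Int) := by simp
    have hgetc : PySem.List.pyGetD (rest.reverse ++ [c]) (rest.length : Int) ' ' = c := by
      rw [PySem.List.pyGetD_eq_getElem _ _ (by omega) (by simp)]
      simp
    unfold pvBList
    rw [hcons, hlen, pvFindB, hgetc]
    by_cases hw : c = '9' ∨ c = 'z'
    · rw [dif_pos ⟨Int.natCast_nonneg _, hw⟩,
        pvFindB_append rest.length rest.reverse c _ (by omega)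
          (by simp only [List.length_reverse, List.length_append, List.length_singleton]; omega)]
      set i := pvFindB rest.reverse ((rest.length : Int) - 1) with hi
      have hib : -1 ≤ i ∧ i ≤ (rest.length : Int) - 1 := by
        have h1 := pvFindB_le rest.reverse ((rest.length : Int) - 1) (by omega)
        omega
      have hsplit : pvBaux (rest.reverse ++ [c]) i
          = pvBaux rest.reverse i ++ [if c = '9' then '0' else 'a'] := by
        have hreset : PySem.List.slice (rest.reverse ++ [c]) (some (i + 1)) none
            = PySem.List.slice rest.reverse (some (i + 1)) none ++ [c] := by
          rw [PySem.List.slice_from _ (by omega), PySem.List.slice_from _ (by omega)]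
          rw [List.drop_append_of_le_length (by simp only [List.length_reverse, List.length_append, List.length_singleton]; omega)]
        unfold pvBaux
        by_cases hineg : i < 0
        · rw [if_pos hineg, if_pos hineg, hreset, List.map_append]
          simp
        · have hi0 : (0 : Int) ≤ i := by omega
          have hslice : PySem.List.slice (rest.reverse ++ [c]) none (some i)
              = PySem.List.slice rest.reverse none (some i) := by
            rw [PySem.List.slice_to _ hi0, PySem.List.slice_to _ hi0]
            rw [List.take_append_of_le_length (by simp only [List.length_reverse, List.length_append, List.length_singleton]; omega)]
          have hgeti : PySem.List.pyGetD (rest.reverse ++ [c]) i ' '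
              = PySem.List.pyGetD rest.reverse i ' ' := by
            rw [PySem.List.pyGetD_eq_getElem _ _ hi0 (by simp only [List.length_append, List.length_reverse, List.length_singleton]; omega),
                PySem.List.pyGetD_eq_getElem _ _ hi0 (by simp only [List.length_reverse, List.length_append, List.length_singleton]; omega)]
            rw [List.getElem_append_left (by simp only [List.length_reverse, List.length_append, List.length_singleton]; omega)]
          rw [if_neg hineg, if_neg hineg, hslice, hgeti, hreset, List.map_append]
          simp
      have ihx : pvBaux rest.reverse i = (pvIncR rest).reverse := by
        have := ih
        unfold pvBList at this
        rw [show ((rest.reverse.length : Int)) - 1 = (rest.length : Int) - 1 by simp] at this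
        rw [← hi] at this
        exact this
      rw [hsplit, ihx]
      rcases hw with h | h <;> subst h <;> simp [pvIncR]
    · rw [not_or] at hw
      have hcond : ¬ ((0:Int) ≤ (rest.length : Int) ∧ (c = '9' ∨ c = 'z')) := by
        intro hx
        rcases hx.2 with h | h
        · exact hw.1 h
        · exact hw.2 h
      rw [dif_neg hcond]
      have hineg : ¬ ((rest.length : Int) < 0) := by omega
      have hreset : PySem.List.slice (rest.reverse ++ [c]) (some ((rest.length : Int) + 1)) none = [] := by
        rw [PySem.List.slice_from _ (by omega)]
        apply List.drop_eq_nil_of_le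
        simp only [List.length_append, List.length_reverse, List.length_singleton]
        omega
      have hslice : PySem.List.slice (rest.reverse ++ [c]) none (some (rest.length : Int)) = rest.reverse := by
        rw [PySem.List.slice_to _ (by omega)]
        rw [List.take_append_of_le_length (by simp only [List.length_reverse, List.length_append, List.length_singleton]; omega)]
        simp
      unfold pvBaux
      rw [if_neg hineg, hreset, hslice, hgetc]
      simp [pvIncR, hw.1, hw.2]

-- ===== VERDICT (by name: the statement is the Claim_ definition above) =====
theorem increase_guess_by_1_spec : Claim_equal_increase_guess_by_1 := by
  intro guess _
  show increase_guess_by_1 guess = increase_guess_by_1_alt guess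
  have hA : increase_guess_by_1 guess = String.ofList ((pvIncR guess.toList.reverse).reverse) := by
    unfold increase_guess_by_1
    exact congrArg (fun l => String.ofList l) (pvA_char guess.toList)
  have hB : increase_guess_by_1_alt guess = String.ofList ((pvIncR guess.toList.reverse).reverse) := by
    rw [pvB_eq_list]
    exact congrArg String.ofList (by simpa using pvB_char guess.toList.reverse)
  rw [hA, hB]
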